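-- pv_equiv track=rewrite | github.com/thedrugsdontwork/AES-python | aesexample.py | __get_rcon
-- ===== SOURCE A (Python) =====
-- def __get_rcon(num):
--     if num==1:
--         return 1
--     else:
--         pre_rci=__get_rcon(num-1)
--         if pre_rci<0x80:
--             return 2*pre_rci
--         elif pre_rci>=0x80:
--             return (2*pre_rci)^(0x11b)
-- ===== SOURCE B (Python) =====
-- def __get_rcon(num):
--     rci = 1
--     for _ in range(1, num):
--         rci = 2 * rci if rci < 0x80 else (2 * rci) ^ 0x11b
--     return rci
-- ===== Notes on version B (the rewrite author's own statement) =====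
-- stated objective: simpler
-- what changed: Replaces the recursive call chain with a flat iterative loop keeping one running accumulator, doubling (and conditionally XOR-ing 0x11b) num-1 times.
-- outside the precondition, e.g. on __get_rcon(0): A raises RecursionError, B returns 1
import Mathlib
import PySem

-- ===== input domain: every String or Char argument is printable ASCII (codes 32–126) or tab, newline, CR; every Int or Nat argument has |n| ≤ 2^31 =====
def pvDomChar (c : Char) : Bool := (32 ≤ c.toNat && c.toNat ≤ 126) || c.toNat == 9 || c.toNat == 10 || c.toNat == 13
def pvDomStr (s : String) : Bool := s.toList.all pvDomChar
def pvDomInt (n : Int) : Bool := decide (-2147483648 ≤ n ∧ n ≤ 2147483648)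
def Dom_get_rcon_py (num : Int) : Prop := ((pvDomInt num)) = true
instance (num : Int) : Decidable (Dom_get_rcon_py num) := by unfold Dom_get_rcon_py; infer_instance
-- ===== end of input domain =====

-- B replaces A's recursive GF(2^8)-doubling chain with a flat iterative loop over range(1, num); simpler, same cost.


-- ===== PORT A =====
-- literal port of A's recursion; the 'num ≤ 1' guard only makes the recursion total
-- (Pre_ restricts to num ≥ 1, where it coincides with Python's 'num == 1' base case)
def get_rcon_py (num : Int) : Int :=
  if num ≤ 1 then 1
  else
    let pre_rci := get_rcon_py (num - 1)
    if pre_rci < 0x80 then 2 * pre_rci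
    else PySem.Int.bxor (2 * pre_rci) 0x11b
termination_by num.toNat
decreasing_by omega

-- ===== PORT B =====
def get_rcon_py_alt (num : Int) : Int :=
  (PySem.List.pyRange 1 num 1).foldl
    (fun rci _ => if rci < 0x80 then 2 * rci else PySem.Int.bxor (2 * rci) 0x11b) 1

-- ===== PRECONDITION & SPEC =====
-- Pre_ excludes num ≤ 0, where A's recursion never reaches its base case and raises RecursionError.
def Pre_get_rcon_py (num : Int) : Prop := 1 ≤ num
instance (num : Int) : Decidable (Pre_get_rcon_py num) := by unfold Pre_get_rcon_py; infer_instance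
def pvWitness_get_rcon_py : Int := 5

def Spec_get_rcon_py (num : Int) (out : Int) : Prop := out = get_rcon_py_alt num
instance (num : Int) (out : Int) : Decidable (Spec_get_rcon_py num out) := by unfold Spec_get_rcon_py; infer_instance

-- ===== CLAIM (what is proved, stated in full; the proofs are below) =====
def Claim_equal_get_rcon_py : Prop := ∀ (num : Int), Dom_get_rcon_py num → Pre_get_rcon_py num → Spec_get_rcon_py num (get_rcon_py num)

-- ===== LEMMAS AND PROOFS =====
lemma get_rcon_agree (n : Nat) : get_rcon_py (1 + n) = get_rcon_py_alt (1 + n) := by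
  induction n with
  | zero =>
    rw [get_rcon_py]
    simp [get_rcon_py_alt, PySem.List.pyRange]
  | succ k ih =>
    rw [get_rcon_py]
    have h1 : ¬ ((1 : Int) + (k + 1 : Nat) ≤ 1) := by push_cast; omega
    have h2 : (1 : Int) + (k + 1 : Nat) - 1 = 1 + (k : Nat) := by push_cast; ring
    simp only [h1, if_false, h2, ih]
    unfold get_rcon_py_alt
    have h3 : PySem.List.pyRange 1 (1 + ((k : Int) + 1)) 1
        = PySem.List.pyRange 1 (1 + (k : Int)) 1 ++ [1 + (k : Int)] := by
      have := PySem.List.pyRange_one_succ_right (a := 1) (b := 1 + (k : Int)) (by omega)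
      simpa [show (1 : Int) + (k : Int) + 1 = 1 + ((k : Int) + 1) by ring] using this
    push_cast
    rw [h3, List.foldl_append]
    simp [List.foldl]

-- ===== VERDICT (by name: the statement is the Claim_ definition above) =====
theorem get_rcon_py_spec : Claim_equal_get_rcon_py := by
  intro num _ hpre
  simp only [Pre_get_rcon_py] at hpre
  unfold Spec_get_rcon_py
  obtain ⟨n, rfl⟩ : ∃ n : Nat, num = 1 + (n : Int) :=
    ⟨(num - 1).toNat, by omega⟩
  exact get_rcon_agree n
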